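-- pv_equiv track=rewrite | github.com/azraeltruthsay/gaia | gaia-common/gaia_common/utils/world_state.py | _capability_affordances
-- ===== SOURCE A (Python) =====
-- from typing import Dict, List, Optional
--
-- def _capability_affordances(tools: List[str]) -> List[str]:
--     """
--     Generate natural-language capability hints based on available tools.
--
--     This is intentionally fuzzy/semantic rather than keyword-matching.
--     The goal is to help GAIA understand what she *can* do, not prescribe
--     exact invocations.
--     """
--     affordances = []
--
--     # File exploration capabilities
--     file_tools = [t for t in tools if any(w in t.lower() for w in ['file', 'dir', 'tree', 'find', 'read', 'list'])]
--     if file_tools: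
--         affordances.append(
--             "You can explore your own codebase and knowledge files—search by name, "
--             "browse directories, or read documents to answer questions about yourself."
--         )
--
--     # Memory/semantic search capabilities
--     memory_tools = [t for t in tools if 'memory' in t.lower() or 'query' in t.lower()]
--     if memory_tools:
--         affordances.append(
--             "You have semantic memory—you can search your indexed knowledge for concepts, "
--             "not just filenames."
--         )
--
--     # Write capabilities
--     write_tools = [t for t in tools if 'write' in t.lower()]
--     if write_tools:
--         affordances.append(
--             "You can write files (with operator approval) to persist thoughts, notes, or outputs."
--         )
--
--     return affordances
-- ===== SOURCE B (Python) =====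
-- from typing import Dict, List, Optional
--
-- _FILE_WORDS = ('file', 'dir', 'tree', 'find', 'read', 'list')
--
-- def _capability_affordances(tools: List[str]) -> List[str]:
--     has_file = has_memory = has_write = False
--     for t in tools:
--         low = t.lower()
--         if any(w in low for w in _FILE_WORDS):
--             has_file = True
--         if 'memory' in low or 'query' in low:
--             has_memory = True
--         if 'write' in low:
--             has_write = True
--     affordances = []
--     if has_file:
--         affordances.append(
--             "You can explore your own codebase and knowledge files—search by name, "
--             "browse directories, or read documents to answer questions about yourself."
--         )
--     if has_memory:
--         affordances.append(
--             "You have semantic memory—you can search your indexed knowledge for concepts, "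
--             "not just filenames."
--         )
--     if has_write:
--         affordances.append(
--             "You can write files (with operator approval) to persist thoughts, notes, or outputs."
--         )
--     return affordances
-- ===== Notes on version B (the rewrite author's own statement) =====
-- stated objective: faster
-- what changed: Replaces A's three independent filter scans over the tool list (each building an intermediate list only tested for emptiness) with one pass maintaining three boolean flags, lowercasing each name once, then emitting the same three hints in the same order.
import Mathlib
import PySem

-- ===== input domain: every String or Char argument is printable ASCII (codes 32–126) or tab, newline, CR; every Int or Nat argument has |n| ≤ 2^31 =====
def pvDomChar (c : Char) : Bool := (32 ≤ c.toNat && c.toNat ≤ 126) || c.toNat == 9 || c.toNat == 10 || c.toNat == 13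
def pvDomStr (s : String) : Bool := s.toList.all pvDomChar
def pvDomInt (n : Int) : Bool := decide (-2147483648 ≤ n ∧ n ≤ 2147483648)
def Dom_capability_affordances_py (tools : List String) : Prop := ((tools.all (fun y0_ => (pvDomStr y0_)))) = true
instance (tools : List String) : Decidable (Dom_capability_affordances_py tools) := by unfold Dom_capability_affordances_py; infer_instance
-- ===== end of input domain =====

-- B replaces A's three independent filter scans with one pass keeping three boolean flags (alternative decomposition, same cost class).

-- shared literal constants (keyword lists and hint strings of the Python source)
def pvFileWords : List String := ["file", "dir", "tree", "find", "read", "list"]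
def pvHintFile : String :=
  "You can explore your own codebase and knowledge files—search by name, browse directories, or read documents to answer questions about yourself."
def pvHintMemory : String :=
  "You have semantic memory—you can search your indexed knowledge for concepts, not just filenames."
def pvHintWrite : String :=
  "You can write files (with operator approval) to persist thoughts, notes, or outputs."

-- ===== PORT A =====
def capability_affordances_py (tools : List String) : List String :=
  let affordances : List String := []
  let file_tools := tools.filter (fun t => pvFileWords.any (fun w => PySem.Str.isIn w (PySem.Str.lower t)))
  let affordances := if file_tools.isEmpty then affordances else affordances ++ [pvHintFile]
  let memory_tools := tools.filter (fun t => PySem.Str.isIn "memory" (PySem.Str.lower t) || PySem.Str.isIn "query" (PySem.Str.lower t))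
  let affordances := if memory_tools.isEmpty then affordances else affordances ++ [pvHintMemory]
  let write_tools := tools.filter (fun t => PySem.Str.isIn "write" (PySem.Str.lower t))
  let affordances := if write_tools.isEmpty then affordances else affordances ++ [pvHintWrite]
  affordances

-- ===== PORT B =====
def capability_affordances_py_alt (tools : List String) : List String :=
  let flags := tools.foldl
    (fun (fl : Bool × Bool × Bool) t =>
      let low := PySem.Str.lower t
      let f := if pvFileWords.any (fun w => PySem.Str.isIn w low) then true else fl.1
      let m := if PySem.Str.isIn "memory" low || PySem.Str.isIn "query" low then true else fl.2.1
      let wr := if PySem.Str.isIn "write" low then true else fl.2.2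
      (f, m, wr))
    (false, false, false)
  (if flags.1 then [pvHintFile] else []) ++
  (if flags.2.1 then [pvHintMemory] else []) ++
  (if flags.2.2 then [pvHintWrite] else [])

-- ===== PRECONDITION & SPEC =====
def Spec_capability_affordances_py (tools : List String) (out : List String) : Prop := out = capability_affordances_py_alt tools
instance (tools : List String) (out : List String) : Decidable (Spec_capability_affordances_py tools out) := by unfold Spec_capability_affordances_py; infer_instance

-- ===== CLAIM (what is proved, stated in full; the proofs are below) =====
def Claim_equal_capability_affordances_py : Prop := ∀ (tools : List String), Dom_capability_affordances_py tools → Spec_capability_affordances_py tools (capability_affordances_py tools)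

-- ===== LEMMAS AND PROOFS =====

lemma pv_foldl_flags (tools : List String)
    (pf pm pw : String → Bool) (a b c : Bool) :
    tools.foldl
      (fun (fl : Bool × Bool × Bool) t =>
        ((if pf t then true else fl.1),
         (if pm t then true else fl.2.1),
         (if pw t then true else fl.2.2)))
      (a, b, c)
    = (a || tools.any pf, b || tools.any pm, c || tools.any pw) := by
  induction tools generalizing a b c with
  | nil => simp
  | cons h t ih =>
    simp only [List.foldl_cons, List.any_cons, ih]
    by_cases hf : pf h <;> by_cases hm : pm h <;> by_cases hw : pw h <;> simp [hf, hm, hw]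

lemma pv_filter_isEmpty {α : Type} (p : α → Bool) (l : List α) :
    (l.filter p).isEmpty = !(l.any p) := by
  induction l with
  | nil => rfl
  | cons h t ih => by_cases hp : p h <;> simp [hp, ih]

-- ===== VERDICT (by name: the statement is the Claim_ definition above) =====
theorem capability_affordances_py_spec : Claim_equal_capability_affordances_py := by
  intro tools _
  unfold Spec_capability_affordances_py capability_affordances_py capability_affordances_py_alt
  simp only [pv_foldl_flags, Bool.false_or, pv_filter_isEmpty]
  cases hf : tools.any (fun t => pvFileWords.any (fun w => PySem.Str.isIn w (PySem.Str.lower t))) <;>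
  cases hm : tools.any (fun t => PySem.Str.isIn "memory" (PySem.Str.lower t) || PySem.Str.isIn "query" (PySem.Str.lower t)) <;>
  cases hw : tools.any (fun t => PySem.Str.isIn "write" (PySem.Str.lower t)) <;>
  simp only [hf, Bool.not_true, Bool.not_false, if_true, if_false, Bool.false_eq_true,
    List.nil_append, List.append_nil, ite_true, ite_false] <;> rfl
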